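-- pv_equiv track=rewrite | github.com/nathanieljevans/BMI650 | HW1/evans_hw1.py | __codon_gen
-- ===== SOURCE A (Python) =====
-- def __codon_gen(seq):
--     '''
--         This is a generator function that returns the next codon in a given mRNA seq at each possible reading frame
--     Args:
--         seq (str) : mRNA sequence
--     Returns:
--        (tuple<str>) : 3-len tuple where each value is a three character string representing the next codon
--     '''
--     i = 0
--     while (i < len(seq)-2):
--         rd0 = seq[i:i+3]
--         rd1 = seq[i+1:i+4]
--         rd2 = seq[i+2:i+5]
--         i += 3
--         yield (rd0, rd1, rd2)
-- ===== SOURCE B (Python) =====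
-- def __codon_gen(seq):
--     '''Streaming re-implementation: consume seq one character at a time into a
--     bounded 5-char buffer; whenever the buffer fills to 5 chars, emit the codon
--     triple for that window and drop the first 3 chars; after the stream ends,
--     one truncated tail triple is emitted if at least 3 chars remain.'''
--     buf = []
--     for ch in seq:
--         buf.append(ch)
--         if len(buf) == 5:
--             yield (''.join(buf[:3]), ''.join(buf[1:4]), ''.join(buf[2:5]))
--             buf = buf[3:]
--     if len(buf) >= 3:
--         yield (''.join(buf[:3]), ''.join(buf[1:]), ''.join(buf[2:]))
-- ===== Notes on version B (the rewrite author's own statement) =====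
-- stated objective: alternative
-- what changed: Replaces the index-based while loop that slices seq at 5 positions per step with a streaming single pass: each character is appended to a bounded 5-char buffer, a full buffer emits one codon triple and drops 3 chars, and a leftover buffer of at least 3 chars emits the truncated tail triple; B never indexes or slices seq and works on any character iterable.
import Mathlib
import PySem

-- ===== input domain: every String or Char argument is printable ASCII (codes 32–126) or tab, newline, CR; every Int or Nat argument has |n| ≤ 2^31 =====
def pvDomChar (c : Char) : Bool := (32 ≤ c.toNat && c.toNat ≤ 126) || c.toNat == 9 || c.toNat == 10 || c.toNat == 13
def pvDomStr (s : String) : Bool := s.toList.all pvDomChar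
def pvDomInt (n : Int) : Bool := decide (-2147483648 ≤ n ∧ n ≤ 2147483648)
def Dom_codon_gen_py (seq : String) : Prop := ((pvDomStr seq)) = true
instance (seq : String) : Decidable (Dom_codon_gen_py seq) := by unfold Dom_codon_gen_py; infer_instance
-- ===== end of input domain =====

-- B replaces A's index-slicing while loop with a streaming single pass: each character is
-- pushed into a bounded 5-char buffer; a full buffer emits one codon triple and drops 3 chars,
-- and a ≥3-char leftover buffer emits the truncated tail triple (alternative decomposition;
-- return value only — both Pythons are generators).

-- ===== PORT A =====
-- while (i < len(seq)-2): yield (seq[i:i+3], seq[i+1:i+4], seq[i+2:i+5]); i += 3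
def codonLoopA (seq : String) (i : Nat) : List (String × String × String) :=
  if h : (i : Int) < PySem.Str.len seq - 2 then
    (PySem.Str.slice seq (some (i : Int)) (some ((i : Int) + 3)),
     PySem.Str.slice seq (some ((i : Int) + 1)) (some ((i : Int) + 4)),
     PySem.Str.slice seq (some ((i : Int) + 2)) (some ((i : Int) + 5)))
      :: codonLoopA seq (i + 3)
  else []
termination_by seq.length - i
decreasing_by
  have hl : PySem.Str.len seq = (seq.length : Int) := PySem.Str.len_eq seq
  rw [hl] at h; omega

def codon_gen_py (seq : String) : List (String × String × String) :=
  codonLoopA seq 0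

-- ===== PORT B =====
-- for ch in seq: buf.append(ch); if len(buf) == 5: yield window; buf = buf[3:]
def codonStepB (st : List (String × String × String) × List Char) (ch : Char) :
    List (String × String × String) × List Char :=
  let buf := st.2 ++ [ch]
  if buf.length = 5 then
    (st.1 ++ [(String.ofList (buf.take 3),
               String.ofList ((buf.drop 1).take 3),
               String.ofList ((buf.drop 2).take 3))],
     buf.drop 3)
  else (st.1, buf)

-- if len(buf) >= 3: yield (''.join(buf[:3]), ''.join(buf[1:]), ''.join(buf[2:]))
def codon_gen_py_alt (seq : String) : List (String × String × String) :=
  let st := seq.toList.foldl codonStepB ([], [])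
  if 3 ≤ st.2.length then
    st.1 ++ [(String.ofList (st.2.take 3),
              String.ofList (st.2.drop 1),
              String.ofList (st.2.drop 2))]
  else st.1

-- ===== PRECONDITION & SPEC =====
def Spec_codon_gen_py (seq : String) (out : List (String × String × String)) : Prop := out = codon_gen_py_alt seq
instance (seq : String) (out : List (String × String × String)) : Decidable (Spec_codon_gen_py seq out) := by unfold Spec_codon_gen_py; infer_instance

-- ===== CLAIM =====
def Claim_equal_codon_gen_py : Prop := ∀ (seq : String), Dom_codon_gen_py seq → Spec_codon_gen_py seq (codon_gen_py seq)

-- ===== LEMMAS AND PROOFS =====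

-- common characterisation: the codon triples of a char list, consumed 3 at a time
def codonsL (l : List Char) : List (String × String × String) :=
  match l with
  | a :: b :: c :: rest =>
      (String.ofList [a, b, c],
       String.ofList ([b, c] ++ rest.take 1),
       String.ofList ([c] ++ rest.take 2)) :: codonsL rest
  | _ => []

lemma codonsL_short (l : List Char) (h : l.length < 3) : codonsL l = [] := by
  match l with
  | [] => rfl
  | [_] => rfl
  | [_, _] => rfl
  | _ :: _ :: _ :: _ => simp at h; omega

-- A's loop from index i computes the codons of the dropped suffix
lemma loopA_eq_codonsL (seq : String) (i : Nat) :
    codonLoopA seq i = codonsL (seq.toList.drop i) := by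
  induction i using codonLoopA.induct seq with
  | case1 i h ih =>
    have hl : PySem.Str.len seq = (seq.length : Int) := PySem.Str.len_eq seq
    rw [hl] at h
    have hlen : i + 3 ≤ seq.toList.length := by
      have := String.length_toList (s := seq); omega
    -- name the three chars at positions i, i+1, i+2
    obtain ⟨a, b, c, rest, hd⟩ :
        ∃ a b c rest, seq.toList.drop i = a :: b :: c :: rest := by
      have h1 : i < seq.toList.length := by omega
      have h2 : i + 1 < seq.toList.length := by omega
      have h3 : i + 2 < seq.toList.length := by omega
      refine ⟨seq.toList[i], seq.toList[i+1], seq.toList[i+2], seq.toList.drop (i+3), ?_⟩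
      have e1 : seq.toList.drop i = seq.toList[i] :: seq.toList.drop (i+1) :=
        List.drop_eq_getElem_cons h1
      have e2 : seq.toList.drop (i+1) = seq.toList[i+1] :: seq.toList.drop (i+2) :=
        List.drop_eq_getElem_cons h2
      have e3 : seq.toList.drop (i+2) = seq.toList[i+2] :: seq.toList.drop (i+3) :=
        List.drop_eq_getElem_cons h3
      rw [e1, e2, e3]
    rw [codonLoopA, dif_pos (by rw [hl]; omega)]
    have hs0 : PySem.Str.slice seq (some (i : Int)) (some ((i : Int) + 3))
        = String.ofList ((seq.toList.drop i).take 3) := by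
      apply String.toList_injective
      simp [PySem.Str.toList_slice, PySem.Chars.slice_eq_listSlice]
      rw [show ((i : Int) + 3) = ((i + 3 : Nat) : Int) by push_cast; ring]
      rw [PySem.List.slice_natCast]
      congr 1; omega
    have hs1 : PySem.Str.slice seq (some ((i : Int) + 1)) (some ((i : Int) + 4))
        = String.ofList ((seq.toList.drop (i + 1)).take 3) := by
      apply String.toList_injective
      simp [PySem.Str.toList_slice, PySem.Chars.slice_eq_listSlice]
      rw [show ((i : Int) + 1) = ((i + 1 : Nat) : Int) by push_cast; ring,
          show ((i : Int) + 4) = ((i + 4 : Nat) : Int) by push_cast; ring]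
      rw [PySem.List.slice_natCast]
      congr 1; omega
    have hs2 : PySem.Str.slice seq (some ((i : Int) + 2)) (some ((i : Int) + 5))
        = String.ofList ((seq.toList.drop (i + 2)).take 3) := by
      apply String.toList_injective
      simp [PySem.Str.toList_slice, PySem.Chars.slice_eq_listSlice]
      rw [show ((i : Int) + 2) = ((i + 2 : Nat) : Int) by push_cast; ring,
          show ((i : Int) + 5) = ((i + 5 : Nat) : Int) by push_cast; ring]
      rw [PySem.List.slice_natCast]
      congr 1; omega
    have hd1 : seq.toList.drop (i + 1) = b :: c :: rest := by
      have : (seq.toList.drop i).drop 1 = seq.toList.drop (i + 1) := by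
        rw [List.drop_drop]
      rw [← this, hd]; rfl
    have hd2 : seq.toList.drop (i + 2) = c :: rest := by
      have : (seq.toList.drop i).drop 2 = seq.toList.drop (i + 2) := by
        rw [List.drop_drop]
      rw [← this, hd]; rfl
    have hd3 : seq.toList.drop (i + 3) = rest := by
      have : (seq.toList.drop i).drop 3 = seq.toList.drop (i + 3) := by
        rw [List.drop_drop]
      rw [← this, hd]; rfl
    rw [hs0, hs1, hs2, hd, hd1, hd2, ih, hd3]
    show _ = codonsL (a :: b :: c :: rest)
    rw [codonsL]
    simp [List.take_succ_cons]
  | case2 i h =>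
    have hl : PySem.Str.len seq = (seq.length : Int) := PySem.Str.len_eq seq
    rw [hl] at h
    rw [codonLoopA, dif_neg (by rw [hl]; omega)]
    rw [codonsL_short]
    have := String.length_toList (s := seq)
    simp; omega

-- the streaming fold+tail from any ≤4-char buffer computes out ++ codons of (buf ++ l)
lemma foldB_eq_codonsL (l : List Char) :
    ∀ (out : List (String × String × String)) (buf : List Char), buf.length ≤ 4 →
    (let st := l.foldl codonStepB (out, buf)
     if 3 ≤ st.2.length then
       st.1 ++ [(String.ofList (st.2.take 3),
                 String.ofList (st.2.drop 1),
                 String.ofList (st.2.drop 2))]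
     else st.1) = out ++ codonsL (buf ++ l) := by
  induction l with
  | nil =>
    intro out buf hb
    simp only [List.foldl_nil, List.append_nil]
    match buf, hb with
    | [], _ => simp [codonsL]
    | [_], _ => simp [codonsL]
    | [_, _], _ => simp [codonsL]
    | [a, b, c], _ => simp [codonsL]
    | [a, b, c, d], _ => simp [codonsL]
  | cons ch l ih =>
    intro out buf hb
    simp only [List.foldl_cons]
    by_cases h4 : buf.length = 4
    · -- buffer fills to 5: emit the window, keep the last 2 chars
      match buf, h4 with
      | [a, b, c, d], _ =>
        have hstep : codonStepB (out, [a, b, c, d]) ch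
            = (out ++ [(String.ofList [a, b, c],
                        String.ofList [b, c, d],
                        String.ofList [c, d, ch])], [d, ch]) := by
          simp [codonStepB]
        rw [hstep, ih _ [d, ch] (by simp)]
        show _ = out ++ codonsL (a :: b :: c :: (d :: ch :: l))
        rw [codonsL]
        simp [List.take]
    · -- buffer below 5 after the push: no emission
      have hstep : codonStepB (out, buf) ch = (out, buf ++ [ch]) := by
        simp [codonStepB]
        intro habs
        exact absurd (by simpa using habs) (by omega)
      rw [hstep, ih out (buf ++ [ch]) (by simp; omega)]
      simp

-- ===== VERDICT =====
theorem codon_gen_py_spec : Claim_equal_codon_gen_py := by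
  intro seq _
  unfold Spec_codon_gen_py codon_gen_py codon_gen_py_alt
  rw [loopA_eq_codonsL seq 0]
  have := foldB_eq_codonsL seq.toList [] [] (by simp)
  simpa using this.symm
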